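-- pv_equiv track=rewrite | github.com/Eiriksen/Advent-of-code | AOC 2024/Day 9 - Harddrive.py | compact_list2
-- ===== SOURCE A (Python) =====
-- def compact_list2(lis,ID):
--     ID = str(ID)
--
--     # trim of trailing empty space
--     while lis[-1] == ":":
--         lis = lis[:-1]
--
--     length = lis.count(ID)
--     location = lis.index(ID)
--
--
--     ### find the location of the first dots that fit:
--     # convert list to string, all files are single-digit zero:
--     lis_single = ["0" if x!="." else "." for x in lis]
--     lis_string = "".join(lis_single)
--     # cut of all parts of that list which are to the right of our number
--     lis_string = lis_string[:location]
--     # find first location of .... that fits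
--     try:
--         loc_of_emptyspace = lis_string.index("."*length)
--     except:
--         return(lis)
--         # if none, skip this one
--
--     # if empty space found
--     # remove all files of ID from list
--     # i.e. repalce it with dots
--     lis_new = ["." if x==ID else x for x in lis]
--
--     # then place that file, of same length at the correct location in the list
--     for i in range(0,length):
--         lis_new[loc_of_emptyspace+i]=ID
--
--     return(lis_new)
-- ===== SOURCE B (Python) =====
-- def compact_list2(lis, ID):
--     s = str(ID)
--
--     # trim trailing empty space (same trim as A; lis[-1]/index raise on the same inputs)
--     while lis[-1] == ":":
--         lis = lis[:-1]
--
--     length = lis.count(s)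
--     location = lis.index(s)
--
--     # one left-to-right scan keeping a run counter of consecutive '.' cells;
--     # the run must end strictly before `location`, so start+length <= location holds
--     start = -1
--     run = 0
--     for i, x in enumerate(lis[:location]):
--         run = run + 1 if x == "." else 0
--         if run == length:
--             start = i + 1 - length
--             break
--
--     if start < 0:
--         return lis
--
--     # rebuild in one pass: the moved file occupies start..start+length-1,
--     # every other cell keeps its value except the old copies of ID become '.'
--     return [s if start <= j < start + length else ("." if x == s else x)
--             for j, x in enumerate(lis)]
-- ===== Notes on version B (the rewrite author's own statement) =====
-- stated objective: simpler
-- what changed: B drops A's build-a-'0'/'.'-string + str.index('.'*length) gap search in favour of a single run-length scan over the list prefix before the file's location, and replaces A's replace-then-overwrite rebuild (map to dots, then an index-assignment loop) by one indexed comprehension.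
import Mathlib
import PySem

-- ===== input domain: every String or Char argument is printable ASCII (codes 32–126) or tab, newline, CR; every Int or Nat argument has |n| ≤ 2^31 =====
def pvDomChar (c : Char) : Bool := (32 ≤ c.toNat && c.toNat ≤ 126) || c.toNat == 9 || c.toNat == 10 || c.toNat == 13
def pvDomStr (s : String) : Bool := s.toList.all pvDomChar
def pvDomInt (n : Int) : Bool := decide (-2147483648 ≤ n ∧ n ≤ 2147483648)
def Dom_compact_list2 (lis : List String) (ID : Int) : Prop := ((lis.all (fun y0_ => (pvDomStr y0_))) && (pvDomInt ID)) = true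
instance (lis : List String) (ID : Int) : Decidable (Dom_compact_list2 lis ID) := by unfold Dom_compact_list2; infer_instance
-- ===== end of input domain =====

-- B replaces A's join-into-a-'0'/'.'-string + str.index('.'*length) gap search by a single run-length
-- scan over the list prefix, and A's replace-then-overwrite rebuild by one indexed comprehension (objective: simpler).

-- ===== PORT A =====
-- the trailing-":" trim `while lis[-1] == ":": lis = lis[:-1]`, textually identical in Source A and Source B
-- (on a list of only ":" entries Python raises IndexError at lis[-1]; those inputs are outside Pre_)
def pvTrim (l : List String) : List String :=
  match h : l.getLast? with
  | some s => if s = ":" then pvTrim l.dropLast else l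
  | none => l
termination_by l.length
decreasing_by
  have hne : l ≠ [] := by intro he; subst he; simp at h
  have : 0 < l.length := List.length_pos_of_ne_nil hne
  simp [List.length_dropLast]; omega

def compact_list2 (lis : List String) (ID : Int) : List String :=
  let sID := PySem.Int.toStr ID
  let lis := pvTrim lis
  let length := PySem.List.count lis sID
  match PySem.List.index? lis sID with
  | none => []            -- lis.index(ID) raises ValueError; outside Pre_
  | some location =>
    let lis_single := lis.map (fun x => if x ≠ "." then "0" else ".")
    let lis_string := (PySem.Str.join "" lis_single).toList
    let lis_string := lis_string.take location        -- lis_string[:location] (location ≥ 0)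
    -- lis_string.index("."*length): Chars.find = -1 exactly where str.index raises (the except branch)
    let r := PySem.Chars.find lis_string (List.replicate length '.')
    if r = -1 then lis
    else
      let loc := r.toNat
      let lis_new := lis.map (fun x => if x = sID then "." else x)
      -- for i in range(0, length): lis_new[loc+i] = ID   (all indices are in range here)
      (List.range length).foldl (fun a i => a.set (loc + i) sID) lis_new

-- ===== PORT B =====
-- run-length scan of Source B: run counts consecutive '.' cells, first index where run == length wins
def gapScan : List String → Nat → Nat → Nat → Option Nat
  | [], _, _, _ => none
  | x :: xs, i, run, length =>
    let run' := if x = "." then run + 1 else 0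
    if run' = length then some (i + 1 - length) else gapScan xs (i + 1) run' length

def compact_list2_alt (lis : List String) (ID : Int) : List String :=
  let s := PySem.Int.toStr ID
  let lis := pvTrim lis
  let length := PySem.List.count lis s
  match PySem.List.index? lis s with
  | none => []            -- lis.index(s) raises ValueError; outside Pre_
  | some location =>
    match gapScan (lis.take location) 0 0 length with
    | none => lis
    | some start =>
      (PySem.List.enumerate lis 0).map (fun p =>
        if (start : Int) ≤ p.1 ∧ p.1 < (start : Int) + (length : Int) then s
        else if p.2 = s then "." else p.2)

-- ===== PRECONDITION & SPEC =====
-- Pre_ excludes exactly the inputs where A raises: str(ID) must occur in lis (otherwise lis.index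
-- raises ValueError, or lis[-1] raises IndexError on a list of only ":" entries / the empty list).
def Pre_compact_list2 (lis : List String) (ID : Int) : Prop := PySem.Int.toStr ID ∈ lis
instance (lis : List String) (ID : Int) : Decidable (Pre_compact_list2 lis ID) := by
  unfold Pre_compact_list2; infer_instance

def pvWitness_compact_list2 : List String × Int := ([".", ".", "7", ":"], 7)

def Spec_compact_list2 (lis : List String) (ID : Int) (out : List String) : Prop := out = compact_list2_alt lis ID
instance (lis : List String) (ID : Int) (out : List String) : Decidable (Spec_compact_list2 lis ID out) := by unfold Spec_compact_list2; infer_instance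

-- ===== CLAIM (what is proved, stated in full; the proofs are below) =====
def Claim_equal_compact_list2 : Prop := ∀ (lis : List String) (ID : Int), Dom_compact_list2 lis ID → Pre_compact_list2 lis ID → Spec_compact_list2 lis ID (compact_list2 lis ID)

-- ===== LEMMAS AND PROOFS =====

-- proof-side view of a list cell as the single char A's join produces for it
def toCh (x : String) : Char := if x ≠ "." then '0' else '.'

theorem joinL (l : List String) :
    (PySem.Str.join "" (l.map (fun x => if x ≠ "." then "0" else "."))).toList = l.map toCh := by
  rw [PySem.Str.toList_join]
  have hflat : ∀ parts : List (List Char), PySem.Chars.join "".toList parts = parts.flatten := by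
    intro parts
    induction parts with
    | nil => rfl
    | cons a l ihp =>
        show [].intercalate (a :: l) = _
        rw [show (List.nil).intercalate (a :: l) = a ++ ([].intercalate l) by
          cases l <;> simp [List.intercalate, List.intersperse]]
        simp only [List.flatten_cons]
        rw [show ([].intercalate l : List Char) = l.flatten from ihp]
  rw [hflat]
  induction l with
  | nil => rfl
  | cons x xs ih =>
      simp only [List.map_cons, List.flatten_cons, ih]
      by_cases hx : x = "." <;> simp [hx, toCh]

def gapScanC : List Char → Nat → Nat → Nat → Option Nat
  | [], _, _, _ => none
  | c :: cs, i, run, len =>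
    let run' := if c = '.' then run + 1 else 0
    if run' = len then some (i + 1 - len) else gapScanC cs (i + 1) run' len

def firstOcc (H : List Char) (len : Nat) : Option Nat :=
  if (List.replicate len '.').isPrefixOf H then some 0
  else match H with
    | [] => none
    | _ :: tl => (firstOcc tl len).map (· + 1)

theorem repl_not_prefix_repl (run len : Nat) (h : run < len) :
    ¬ (List.replicate len '.' <+: List.replicate run ('.' : Char)) := by
  intro hp
  have := hp.length_le
  simp at this; omega

theorem firstOcc_repl_none (run len : Nat) (h : run < len) :
    firstOcc (List.replicate run '.') len = none := by
  induction run with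
  | zero =>
      rw [firstOcc.eq_def]
      have h0 : (List.replicate len '.').isPrefixOf ([] : List Char) = false := by
        cases hb : (List.replicate len '.').isPrefixOf ([] : List Char) with
        | false => rfl
        | true => exact absurd (List.isPrefixOf_iff_prefix.mp hb) (repl_not_prefix_repl 0 len h)
      simp [h0]
  | succ n ih =>
      rw [List.replicate_succ, firstOcc.eq_def]
      have hnp : (List.replicate len '.').isPrefixOf ('.' :: List.replicate n ('.' : Char)) = false := by
        rw [← List.replicate_succ]
        cases hb : (List.replicate len '.').isPrefixOf (List.replicate (n+1) ('.' : Char)) with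
        | false => rfl
        | true => exact absurd (List.isPrefixOf_iff_prefix.mp hb) (repl_not_prefix_repl (n+1) len h)
      rw [hnp]
      simpa using ih (by omega)

theorem notPrefix (run len : Nat) (c : Char) (cs : List Char) (h : run < len) (hc : c ≠ '.') :
    ¬ (List.replicate len '.' <+: (List.replicate run '.' ++ c :: cs)) := by
  induction run generalizing len with
  | zero =>
      intro hp
      cases len with
      | zero => omega
      | succ m =>
          rw [List.replicate_succ] at hp
          simp at hp
          exact hc hp.1.symm
  | succ n ih =>
      intro hp
      cases len with
      | zero => omega
      | succ m =>
          rw [List.replicate_succ, List.replicate_succ, List.cons_append] at hp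
          have := (List.prefix_cons_inj ('.' : Char)).mp hp
          exact ih m (by omega) this

theorem isPrefixOf_false_of_not (p H : List Char) (h : ¬ p <+: H) : p.isPrefixOf H = false := by
  cases hb : p.isPrefixOf H with
  | false => rfl
  | true => exact absurd (List.isPrefixOf_iff_prefix.mp hb) h

theorem firstOcc_skip (run len : Nat) (c : Char) (cs : List Char) (h : run < len) (hc : c ≠ '.') :
    firstOcc (List.replicate run '.' ++ c :: cs) len = (firstOcc cs len).map (· + (run + 1)) := by
  induction run with
  | zero =>
      rw [firstOcc.eq_def]
      have h0 := isPrefixOf_false_of_not _ _ (notPrefix 0 len c cs h hc)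
      simp at h0
      simp [h0]
  | succ n ih =>
      rw [firstOcc.eq_def]
      have h0 := isPrefixOf_false_of_not _ _ (notPrefix (n+1) len c cs h hc)
      rw [List.replicate_succ, List.cons_append]
      simp only [List.replicate_succ, List.cons_append] at h0
      simp [h0, ih (by omega), Option.map_map]

theorem gapScanC_eq_firstOcc (cs : List Char) (i run len : Nat) (hlen : 0 < len) (hrun : run < len) :
    gapScanC cs i run len = (firstOcc (List.replicate run '.' ++ cs) len).map (fun s => s + i - run) := by
  induction cs generalizing i run with
  | nil =>
      rw [gapScanC]
      simp [firstOcc_repl_none run len hrun]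
  | cons c cs ih =>
      rw [gapScanC]
      by_cases hc : c = '.'
      · subst hc
        by_cases he : run + 1 = len
        · have hp : (List.replicate len '.') <+: (List.replicate run '.' ++ '.' :: cs) := by
            rw [show (List.replicate run '.' ++ '.' :: cs : List Char)
                  = List.replicate (run+1) '.' ++ cs by
                simp [List.replicate_succ']
            ]
            rw [he]
            exact List.prefix_append _ _
          rw [firstOcc.eq_def]
          simp [List.isPrefixOf_iff_prefix.mpr hp |>.symm, he]
          omega
        · have h1 : run + 1 < len := by omega
          simp only [if_true, if_neg he]
          rw [ih (i+1) (run+1) h1]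
          rw [show (List.replicate run '.' ++ '.' :: cs : List Char)
                = List.replicate (run+1) '.' ++ cs by simp [List.replicate_succ']]
          cases firstOcc (List.replicate (run+1) '.' ++ cs) len <;> simp <;> omega
      · simp only [if_neg hc]
        have h0 : ¬ (0 = len) := by omega
        simp only [if_neg h0]
        rw [ih (i+1) 0 hlen]
        rw [firstOcc_skip run len c cs hrun hc]
        cases hocc : firstOcc cs len <;> simp [hocc] <;> omega

theorem firstOcc_none_spec (H : List Char) (len : Nat) (hlen : 0 < len)
    (h : firstOcc H len = none) : ∀ j, ¬ (List.replicate len '.' <+: H.drop j) := by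
  induction H with
  | nil =>
      intro j hp
      have := hp.length_le
      simp at this; omega
  | cons c tl ih =>
      rw [firstOcc.eq_def] at h
      by_cases hb : (List.replicate len '.').isPrefixOf (c :: tl)
      · simp [hb] at h
      · simp [hb] at h
        intro j
        cases j with
        | zero =>
            simpa using fun hp => hb (List.isPrefixOf_iff_prefix.mpr hp)
        | succ m => simpa using ih h m

theorem firstOcc_some_spec (H : List Char) (len s : Nat)
    (h : firstOcc H len = some s) :
    (List.replicate len '.' <+: H.drop s) ∧ ∀ j < s, ¬ (List.replicate len '.' <+: H.drop j) := by
  induction H generalizing s with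
  | nil =>
      rw [firstOcc.eq_def] at h
      by_cases hb : (List.replicate len '.').isPrefixOf ([] : List Char)
      · simp [hb] at h
        subst h
        exact ⟨List.isPrefixOf_iff_prefix.mp hb, by omega⟩
      · simp [hb] at h
  | cons c tl ih =>
      rw [firstOcc.eq_def] at h
      by_cases hb : (List.replicate len '.').isPrefixOf (c :: tl)
      · simp [hb] at h
        subst h
        exact ⟨List.isPrefixOf_iff_prefix.mp hb, by omega⟩
      · simp [hb] at h
        obtain ⟨m, hm, rfl⟩ := h
        obtain ⟨h1, h2⟩ := ih m hm
        refine ⟨by simpa using h1, ?_⟩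
        intro j hj
        cases j with
        | zero => simpa using fun hp => hb (List.isPrefixOf_iff_prefix.mpr hp)
        | succ k => simpa using h2 k (by omega)

theorem find_of_firstOcc_none (H : List Char) (len : Nat) (hlen : 0 < len)
    (h : firstOcc H len = none) : PySem.Chars.find H (List.replicate len '.') = -1 := by
  rw [PySem.Chars.find_eq_neg_one_iff]
  intro hinf
  have : PySem.Chars.isIn (List.replicate len '.') H = true := (PySem.Chars.isIn_iff_infix _ _).mpr hinf
  obtain ⟨j, hj⟩ := (PySem.Chars.exists_prefix_drop_iff_isIn (List.replicate len '.') H).mpr this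
  exact firstOcc_none_spec H len hlen h j hj

theorem find_of_firstOcc_some (H : List Char) (len s : Nat) (_hlen : 0 < len)
    (h : firstOcc H len = some s) : PySem.Chars.find H (List.replicate len '.') = (s : Int) := by
  obtain ⟨h1, h2⟩ := firstOcc_some_spec H len s h
  have hinf : (List.replicate len '.') <:+: H :=
    h1.isInfix.trans (H.drop_suffix s).isInfix
  have hnn : 0 ≤ PySem.Chars.find H (List.replicate len '.') :=
    (PySem.Chars.find_nonneg_iff _ _).mpr hinf
  obtain ⟨hp, hmin⟩ := PySem.Chars.find_spec hnn
  set f := (PySem.Chars.find H (List.replicate len '.')).toNat with hf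
  have hse : s = f := by
    rcases Nat.lt_trichotomy s f with hlt | he | hgt
    · exact absurd h1 (hmin s hlt)
    · exact he
    · exact absurd hp (h2 f hgt)
  omega

theorem firstOcc_some_bound (H : List Char) (len s : Nat) (hlen : 0 < len)
    (h : firstOcc H len = some s) : s + len ≤ H.length := by
  obtain ⟨h1, _⟩ := firstOcc_some_spec H len s h
  have := h1.length_le
  simp at this
  omega

theorem foldl_set_length (n : Nat) (base : List String) (s0 : Nat) (v : String) :
    ((List.range n).foldl (fun a i => a.set (s0 + i) v) base).length = base.length := by
  induction n with
  | zero => simp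
  | succ m ih => rw [List.range_succ, List.foldl_append]; simp [ih]

theorem foldl_set_getElem? (n : Nat) (base : List String) (s0 : Nat) (v : String) (j : Nat) :
    ((List.range n).foldl (fun a i => a.set (s0 + i) v) base)[j]? =
      if s0 ≤ j ∧ j < s0 + n ∧ j < base.length then some v else base[j]? := by
  induction n with
  | zero =>
      simp only [List.range_zero, List.foldl_nil]
      rw [if_neg (by omega)]
  | succ m ih =>
      rw [List.range_succ, List.foldl_append]
      simp only [List.foldl_cons, List.foldl_nil]
      rw [List.getElem?_set]
      rw [foldl_set_length]
      by_cases hj : s0 + m = j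
      · by_cases hlt : s0 + m < base.length
        · have : s0 ≤ j ∧ j < s0 + (m+1) ∧ j < base.length := by omega
          simp [hj, this]
        · have h2 : ¬ (s0 ≤ j ∧ j < s0 + (m+1) ∧ j < base.length) := by omega
          have h3 : ¬ (s0 ≤ j ∧ j < s0 + m ∧ j < base.length) := by omega
          rw [if_pos hj, if_neg hlt, if_neg h2]
          exact (List.getElem?_eq_none (by omega)).symm
      · rw [if_neg hj, ih]
        by_cases h4 : s0 ≤ j ∧ j < s0 + m ∧ j < base.length
        · have h5 : s0 ≤ j ∧ j < s0 + (m+1) ∧ j < base.length := by omega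
          simp [h4, h5]
        · have h5 : ¬ (s0 ≤ j ∧ j < s0 + (m+1) ∧ j < base.length) := by omega
          simp [h4, h5]


theorem toCh_dot_iff (x : String) : (toCh x = '.') ↔ x = "." := by
  by_cases hx : x = "." <;> simp [toCh, hx]

theorem gapScan_eq_gapScanC (l : List String) (i run len : Nat) :
    gapScan l i run len = gapScanC (l.map toCh) i run len := by
  induction l generalizing i run with
  | nil => rfl
  | cons x xs ih =>
      rw [gapScan, List.map_cons, gapScanC]
      by_cases hx : x = "."
      · simp [hx, toCh, ih]
      · have : toCh x ≠ '.' := fun hc => hx ((toCh_dot_iff x).mp hc)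
        simp [hx, this, ih]

theorem compact_list2_eq_all (lis : List String) (ID : Int) :
    compact_list2 lis ID = compact_list2_alt lis ID := by
  simp only [compact_list2, compact_list2_alt]
  cases h : PySem.List.index? (pvTrim lis) (PySem.Int.toStr ID) with
  | none => rfl
  | some location =>
      dsimp only
      set sID := PySem.Int.toStr ID with hsID
      set t := pvTrim lis with ht
      set len := PySem.List.count t sID with hlen
      have hmem : sID ∈ t := by
        have : (PySem.List.index? t sID).isSome := by rw [h]; rfl
        exact (PySem.List.index?_isSome_iff t sID).mp this
      have hlen0 : 0 < len := by
        rw [hlen, PySem.List.count_eq]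
        exact List.count_pos_iff.mpr hmem
      obtain ⟨hloc, -, -⟩ := PySem.List.getElem_of_index?_eq_some h
      have hJ : ((PySem.Str.join "" (t.map (fun x => if x ≠ "." then "0" else "."))).toList).take location
          = (t.take location).map toCh := by
        rw [joinL, List.map_take]
      have hG : gapScan (t.take location) 0 0 len
          = firstOcc ((t.take location).map toCh) len := by
        rw [gapScan_eq_gapScanC, gapScanC_eq_firstOcc _ 0 0 len hlen0 hlen0]
        simp
      have hHlen : ((t.take location).map toCh).length = location := by
        simp [List.length_take]
        omega
      rw [hJ, hG]
      cases hocc : firstOcc ((t.take location).map toCh) len with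
      | none =>
          rw [find_of_firstOcc_none _ _ hlen0 hocc]
          simp
      | some s =>
          have hfind := find_of_firstOcc_some _ _ _ hlen0 hocc
          have hbound := firstOcc_some_bound _ _ _ hlen0 hocc
          rw [hHlen] at hbound
          rw [hfind]
          dsimp only
          rw [if_neg (by omega : ¬ ((s : Int)) = -1)]
          simp only [Int.toNat_natCast]
          apply List.ext_getElem?
          intro j
          rw [foldl_set_getElem?, List.getElem?_map, List.getElem?_map,
              PySem.List.getElem?_enumerate, Option.map_map]
          by_cases hj : j < t.length
          · rw [List.getElem?_eq_getElem hj]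
            simp only [Option.map_some, Function.comp_apply, List.length_map]
            split_ifs <;> first | rfl | (exfalso; omega)
          · rw [List.getElem?_eq_none (by omega)]
            rw [if_neg (by simp; omega)]
            rfl

-- ===== VERDICT (by name: the statement is the Claim_ definition above) =====
theorem compact_list2_spec : Claim_equal_compact_list2 := by
  intro lis ID _ _
  exact compact_list2_eq_all lis ID
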